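-- pv_equiv track=rewrite | github.com/daniel-reich/ubiquitous-fiesta | bdsWZ29zJfJ2Roymv_6.py | swap_two
-- ===== SOURCE A (Python) =====
-- def swap_two(txt):
--   if len(txt)<4: return txt
--   r = ''
--   while len(txt)>3:
--     r += txt[2:4]
--     r += txt[:2]
--     txt = txt[4:]
--   return r + txt
-- ===== SOURCE B (Python) =====
-- import re
--
-- def swap_two(txt):
--     # one regex substitution: each non-overlapping 4-char block "XY ZW" -> "ZW XY";
--     # a trailing run of 0-3 chars never matches and is left unchanged
--     return re.sub(r'(..)(..)', r'\2\1', txt, flags=re.DOTALL)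
-- ===== Notes on version B (the rewrite author's own statement) =====
-- stated objective: idiomatic
-- what changed: Replaced A's manual while-loop that repeatedly slices the string and re-binds the remainder with a single regex substitution (pattern of two 2-char groups, replacement swaps the groups, DOTALL) done in one pass by the regex engine.
import Mathlib
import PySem

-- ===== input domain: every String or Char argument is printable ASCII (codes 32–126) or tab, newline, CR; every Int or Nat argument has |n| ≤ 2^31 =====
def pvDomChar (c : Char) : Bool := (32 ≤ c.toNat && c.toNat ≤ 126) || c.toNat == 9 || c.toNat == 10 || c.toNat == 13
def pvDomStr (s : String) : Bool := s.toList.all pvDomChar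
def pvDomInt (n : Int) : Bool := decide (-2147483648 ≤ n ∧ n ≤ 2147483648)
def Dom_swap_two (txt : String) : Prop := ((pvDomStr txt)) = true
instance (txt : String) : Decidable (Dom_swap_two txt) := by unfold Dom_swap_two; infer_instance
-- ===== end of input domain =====

-- B replaces A's manual while-loop (slice, swap, re-slice, accumulate) with a single
-- regex substitution re.sub(r'(..)(..)', r'\2\1', txt, flags=re.DOTALL) — objective: idiomatic.

-- ===== PORT A =====
-- the while-loop of A: state is the accumulator r and the remaining txt
def swapTwoLoop (r txt : List Char) : List Char :=
  if txt.length > 3 then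
    swapTwoLoop (r ++ PySem.List.slice txt (some 2) (some 4)
                   ++ PySem.List.slice txt none (some 2))
                (PySem.List.slice txt (some 4) none)
  else r ++ txt
termination_by txt.length
decreasing_by rw [PySem.List.slice_from _ (by norm_num : (0:Int) ≤ 4)]; simp; omega

def swap_two (txt : String) : String :=
  if txt.toList.length < 4 then txt
  else String.ofList (swapTwoLoop [] txt.toList)

-- ===== PORT B =====
-- port of re.sub(r'(..)(..)', r'\2\1', txt, flags=re.DOTALL): the engine scans left to
-- right, each match consumes four arbitrary chars (DOTALL) and emits group2 ++ group1;
-- any unmatched tail (< 4 chars) is copied verbatim — exact for this pattern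
def subBlocks : List Char → List Char
  | a :: b :: c :: d :: rest => c :: d :: a :: b :: subBlocks rest
  | rest => rest

def swap_two_alt (txt : String) : String := String.ofList (subBlocks txt.toList)

-- ===== PRECONDITION & SPEC =====
def Spec_swap_two (txt : String) (out : String) : Prop := out = swap_two_alt txt
instance (txt : String) (out : String) : Decidable (Spec_swap_two txt out) := by unfold Spec_swap_two; infer_instance

-- ===== CLAIM (what is proved, stated in full; the proofs are below) =====
def Claim_equal_swap_two : Prop := ∀ (txt : String), Dom_swap_two txt → Spec_swap_two txt (swap_two txt)

-- ===== LEMMAS AND PROOFS =====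
theorem swapTwoLoop_eq (txt : List Char) : ∀ r, swapTwoLoop r txt = r ++ subBlocks txt := by
  induction txt using subBlocks.induct with
  | case1 a b c d rest ih =>
      intro r
      rw [swapTwoLoop.eq_def]
      rw [if_pos (by simp : (a :: b :: c :: d :: rest).length > 3),
          PySem.List.slice_toNat _ (by norm_num) (by norm_num),
          PySem.List.slice_to _ (by norm_num : (0:Int) ≤ 2),
          PySem.List.slice_from _ (by norm_num : (0:Int) ≤ 4)]
      rw [show List.drop (Int.toNat 4) (a::b::c::d::rest) = rest from rfl,
          show List.take (Int.toNat 2) (a::b::c::d::rest) = [a,b] from rfl,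
          show List.take (Int.toNat 4 - Int.toNat 2) (List.drop (Int.toNat 2) (a::b::c::d::rest)) = [c,d] from rfl,
          ih]
      simp [subBlocks]
  | case2 rest h =>
      intro r
      have hlen : ¬ rest.length > 3 := by
        match rest, h with
        | [], _ => simp
        | [_], _ => simp
        | [_, _], _ => simp
        | [_, _, _], _ => simp
        | a :: b :: c :: d :: t, h => exact absurd rfl (h a b c d t)
      rw [swapTwoLoop.eq_def, if_neg hlen]
      have : subBlocks rest = rest := by
        match rest, h with
        | [], _ => rfl
        | [_], _ => rfl
        | [_, _], _ => rfl
        | [_, _, _], _ => rfl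
        | a :: b :: c :: d :: t, h => exact absurd rfl (h a b c d t)
      rw [this]

theorem subBlocks_short (l : List Char) (h : l.length < 4) : subBlocks l = l := by
  match l, h with
  | [], _ => rfl
  | [_], _ => rfl
  | [_, _], _ => rfl
  | [_, _, _], _ => rfl

-- ===== VERDICT (by name: the statement is the Claim_ definition above) =====
theorem swap_two_spec : Claim_equal_swap_two := by
  intro txt _
  unfold Spec_swap_two swap_two swap_two_alt
  split_ifs with h
  · rw [subBlocks_short _ (by omega), String.ofList_toList]
  · rw [swapTwoLoop_eq, List.nil_append]
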